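-- pv_equiv track=rewrite | github.com/luisfpatrocinio/beecrowd | bee_1147.py | comprometerTabuleiro
-- ===== SOURCE A (Python) =====
-- def comprometerTabuleiro(grid: list):
--     for y in range(1, len(grid)):
--         for x in range(len(grid[y])):
--             cell = grid[y][x]
--             if cell == "P":
--                 # É peão, comprometer zonas de ataque:
--                 if x > 0:                   grid[y - 1][x - 1] = "X"
--                 if x < len(grid[y]) - 1:    grid[y - 1][x + 1] = "X"
--
--     return grid
-- ===== SOURCE B (Python) =====
-- def comprometerTabuleiro(grid: list):
--     # Pure pointwise rebuild: a cell (r, c) is "X" exactly when a pawn in the row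
--     # below attacks it diagonally; otherwise it keeps its value. Builds and
--     # returns a NEW grid (does not mutate the argument, unlike A).
--     n = len(grid)
--
--     def attacked(below, c):
--         m = len(below)
--         return (c + 1 < m and below[c + 1] == "P") or \
--                (c >= 1 and c - 1 < m - 1 and below[c - 1] == "P")
--
--     return [["X" if r + 1 < n and attacked(grid[r + 1], c) else grid[r][c]
--              for c in range(len(grid[r]))]
--             for r in range(n)]
-- ===== Notes on version B (the rewrite author's own statement) =====
-- stated objective: alternative
-- what changed: A mutates the grid in place, iterating over pawns and pushing 'X' writes into the row above; B is a pure pointwise rebuild: it constructs a new grid where each cell is computed from a per-cell predicate that looks at the two diagonal neighbours in the row below, with no writes or intermediate state.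
import Mathlib
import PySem

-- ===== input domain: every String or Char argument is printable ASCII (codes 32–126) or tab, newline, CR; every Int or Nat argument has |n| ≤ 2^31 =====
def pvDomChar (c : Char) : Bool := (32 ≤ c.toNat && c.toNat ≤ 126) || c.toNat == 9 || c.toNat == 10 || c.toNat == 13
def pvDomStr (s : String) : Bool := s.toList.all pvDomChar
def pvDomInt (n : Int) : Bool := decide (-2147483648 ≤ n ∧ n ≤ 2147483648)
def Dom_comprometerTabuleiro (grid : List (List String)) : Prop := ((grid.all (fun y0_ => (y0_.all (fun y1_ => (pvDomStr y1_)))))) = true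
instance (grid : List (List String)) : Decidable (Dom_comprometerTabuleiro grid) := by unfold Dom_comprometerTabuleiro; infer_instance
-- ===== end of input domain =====

-- B replaces A's pawn-centric in-place "push" writes with a pure pointwise rebuild of the
-- grid from a per-cell looks-below predicate; A mutates its argument, B does not — the
-- theorems here are about the RETURNED value only.


-- ===== PORT A =====
-- grid[i][j] = v (in-place write); exact under Pre_, which guarantees the index is in range
def pvSetCell (g : List (List String)) (i j : Nat) (v : String) : List (List String) :=
  g.set i ((g.getD i []).set j v)

-- body of A's outer loop (one y): scan row y for pawns, write "X" into row y-1
def pvBodyA (g : List (List String)) (y : Nat) : List (List String) :=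
  (List.range (g.getD y []).length).foldl (fun g x =>
    if (g.getD y []).getD x "" = "P" then
      let g1 := if 0 < x then pvSetCell g (y - 1) (x - 1) "X" else g
      if x < (g1.getD y []).length - 1 then pvSetCell g1 (y - 1) (x + 1) "X" else g1
    else g) g

def comprometerTabuleiro (grid : List (List String)) : List (List String) :=
  (List.range' 1 (grid.length - 1)).foldl pvBodyA grid

-- ===== PORT B =====
-- Source B's `attacked(below, c)`: a pawn at a down-diagonal neighbour of column c
def pvAttacked (below : List String) (c : Nat) : Bool :=
  (decide (c + 1 < below.length) && decide (below.getD (c + 1) "" = "P")) ||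
  (decide (1 ≤ c) && decide (c - 1 < below.length - 1) && decide (below.getD (c - 1) "" = "P"))

-- Source B's nested comprehension: a new grid, each cell a pure function of the input
def comprometerTabuleiro_alt (grid : List (List String)) : List (List String) :=
  (List.range grid.length).map (fun r =>
    (List.range (grid.getD r []).length).map (fun c =>
      if r + 1 < grid.length && pvAttacked (grid.getD (r + 1) []) c then "X"
      else (grid.getD r []).getD c ""))

-- ===== PRECONDITION & SPEC =====
-- Pre_ admits exactly the inputs on which A returns: for every pawn, both attack targets
-- fall inside the row above; on jagged grids violating this, A raises IndexError.
def Pre_comprometerTabuleiro (grid : List (List String)) : Prop :=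
  ∀ y, y < grid.length → ∀ x, x < (grid.getD (y + 1) []).length →
    (grid.getD (y + 1) []).getD x "" = "P" →
    (0 < x → x - 1 < (grid.getD y []).length) ∧
    (x + 1 < (grid.getD (y + 1) []).length → x + 1 < (grid.getD y []).length)

instance (grid : List (List String)) : Decidable (Pre_comprometerTabuleiro grid) := by
  unfold Pre_comprometerTabuleiro; infer_instance

def pvWitness_comprometerTabuleiro : List (List String) := [[".", "."], [".", "P"]]

def Spec_comprometerTabuleiro (grid : List (List String)) (out : List (List String)) : Prop := out = comprometerTabuleiro_alt grid
instance (grid : List (List String)) (out : List (List String)) : Decidable (Spec_comprometerTabuleiro grid out) := by unfold Spec_comprometerTabuleiro; infer_instance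

-- ===== CLAIM (what is proved, stated in full; the proofs are below) =====
def Claim_equal_comprometerTabuleiro : Prop := ∀ (grid : List (List String)), Dom_comprometerTabuleiro grid → Pre_comprometerTabuleiro grid → Spec_comprometerTabuleiro grid (comprometerTabuleiro grid)

-- ===== LEMMAS AND PROOFS =====

-- "pawn at column x of row b attacks column c" (the rule both programs implement)
def pvAtt (b : List String) (x c : Nat) : Bool :=
  decide (b.getD x "" = "P") &&
    ((decide (0 < x) && decide (c = x - 1)) || (decide (x < b.length - 1) && decide (c = x + 1)))

-- A's inner loop lifted to the upper row alone
def pvRowA (b : List String) (u : List String) (l : List Nat) : List String :=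
  l.foldl (fun u x =>
    if b.getD x "" = "P" then
      let u1 := if 0 < x then u.set (x - 1) "X" else u
      if x < b.length - 1 then u1.set (x + 1) "X" else u1
    else u) u

lemma pv_getD_set_self {a : Type} (g : List a) (i : Nat) (r d : a) (h : i < g.length) :
    (g.set i r).getD i d = r := by
  simp [List.getD_eq_getElem?_getD, h]

lemma pv_getD_set_ne {a : Type} (g : List a) (i j : Nat) (r d : a) (h : i ≠ j) :
    (g.set i r).getD j d = g.getD j d := by
  simp [List.getD_eq_getElem?_getD, List.getElem?_set_ne h]

lemma pv_set_getD_self {a : Type} (g : List a) (i : Nat) (d : a) (h : i < g.length) :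
    g.set i (g.getD i d) = g := by
  simp [List.getD_eq_getElem?_getD, List.getElem?_eq_getElem h]

lemma pvAtt_iff (b : List String) (x c : Nat) :
    pvAtt b x c = true ↔
      b.getD x "" = "P" ∧ ((0 < x ∧ c = x - 1) ∨ (x < b.length - 1 ∧ c = x + 1)) := by
  simp [pvAtt]

lemma pvAtt_lt (b : List String) (x c : Nat) (h : pvAtt b x c = true) : x < b.length := by
  have h' := (pvAtt_iff b x c).mp h
  by_cases hx : x < b.length
  · exact hx
  · exfalso
    rw [List.getD_eq_default _ _ (Nat.le_of_not_lt hx)] at h'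
    exact absurd h'.1 (by decide)

lemma pvStepA_length (b u : List String) (x : Nat) :
    (if b.getD x "" = "P" then
      let u1 := if 0 < x then u.set (x - 1) "X" else u
      if x < b.length - 1 then u1.set (x + 1) "X" else u1
    else u).length = u.length := by
  split
  · dsimp only
    split <;> split <;> simp
  · rfl

lemma pvRowA_length (b : List String) (l : List Nat) (u : List String) :
    (pvRowA b u l).length = u.length := by
  induction l generalizing u with
  | nil => rfl
  | cons x l ih =>
    show (pvRowA b _ l).length = u.length
    rw [ih]; exact pvStepA_length b u x

lemma pvStepA_getD (b u : List String) (x c : Nat)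
    (h : ∀ c', pvAtt b x c' = true → c' < u.length) :
    (if b.getD x "" = "P" then
      let u1 := if 0 < x then u.set (x - 1) "X" else u
      if x < b.length - 1 then u1.set (x + 1) "X" else u1
    else u).getD c "" = if pvAtt b x c then "X" else u.getD c "" := by
  split
  case isFalse h1 =>
    have hf : pvAtt b x c = false := by
      rw [Bool.eq_false_iff]
      intro hc
      exact h1 ((pvAtt_iff b x c).mp hc).1
    rw [hf]; simp
  case isTrue h1 =>
    dsimp only
    have hL : 0 < x → pvAtt b x (x - 1) = true :=
      fun h2 => (pvAtt_iff b x (x - 1)).mpr ⟨h1, Or.inl ⟨h2, rfl⟩⟩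
    have hR : x < b.length - 1 → pvAtt b x (x + 1) = true :=
      fun h3 => (pvAtt_iff b x (x + 1)).mpr ⟨h1, Or.inr ⟨h3, rfl⟩⟩
    split
    case isTrue h3 =>
      split
      case isTrue h2 =>
        by_cases hc1 : c = x + 1
        · subst hc1
          rw [pv_getD_set_self _ _ _ _ (by simpa using h _ (hR h3)), hR h3]; simp
        · rw [pv_getD_set_ne _ _ _ _ _ (fun he => hc1 he.symm)]
          by_cases hc2 : c = x - 1
          · subst hc2
            rw [pv_getD_set_self _ _ _ _ (h _ (hL h2)), hL h2]; simp
          · rw [pv_getD_set_ne _ _ _ _ _ (fun he => hc2 he.symm)]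
            have hf : pvAtt b x c = false := by
              rw [Bool.eq_false_iff]
              intro hc
              rcases ((pvAtt_iff b x c).mp hc).2 with ⟨_, hcc⟩ | ⟨_, hcc⟩
              · exact hc2 hcc
              · exact hc1 hcc
            rw [hf]; simp
      case isFalse h2 =>
        by_cases hc1 : c = x + 1
        · subst hc1
          rw [pv_getD_set_self _ _ _ _ (by simpa using h _ (hR h3)), hR h3]; simp
        · rw [pv_getD_set_ne _ _ _ _ _ (fun he => hc1 he.symm)]
          have hf : pvAtt b x c = false := by
            rw [Bool.eq_false_iff]
            intro hc
            rcases ((pvAtt_iff b x c).mp hc).2 with ⟨hh2, _⟩ | ⟨_, hcc⟩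
            · exact h2 hh2
            · exact hc1 hcc
          rw [hf]; simp
    case isFalse h3 =>
      split
      case isTrue h2 =>
        by_cases hc2 : c = x - 1
        · subst hc2
          rw [pv_getD_set_self _ _ _ _ (h _ (hL h2)), hL h2]; simp
        · rw [pv_getD_set_ne _ _ _ _ _ (fun he => hc2 he.symm)]
          have hf : pvAtt b x c = false := by
            rw [Bool.eq_false_iff]
            intro hc
            rcases ((pvAtt_iff b x c).mp hc).2 with ⟨_, hcc⟩ | ⟨hh3, _⟩
            · exact hc2 hcc
            · exact h3 hh3
          rw [hf]; simp
      case isFalse h2 =>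
        have hf : pvAtt b x c = false := by
          rw [Bool.eq_false_iff]
          intro hc
          rcases ((pvAtt_iff b x c).mp hc).2 with ⟨hh2, _⟩ | ⟨hh3, _⟩
          · exact h2 hh2
          · exact h3 hh3
        rw [hf]; simp

lemma pvRowA_getD (b : List String) (l : List Nat) (u : List String)
    (h : ∀ x ∈ l, ∀ c, pvAtt b x c = true → c < u.length) (c : Nat) :
    (pvRowA b u l).getD c "" = if l.any (fun x => pvAtt b x c) then "X" else u.getD c "" := by
  induction l generalizing u with
  | nil => simp [pvRowA]
  | cons x l ih =>
    have hlen := pvStepA_length b u x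
    have hx := h x List.mem_cons_self
    have hstep := pvStepA_getD b u x c hx
    have hrec := ih _ (by intro x' hx' c' hc'; rw [hlen]; exact h x' (List.mem_cons_of_mem _ hx') c' hc')
    show (pvRowA b _ l).getD c "" = _
    rw [hrec, hstep]
    by_cases hA : pvAtt b x c = true <;> by_cases hB : l.any (fun x => pvAtt b x c) = true <;>
      simp [List.any_cons, hA, hB]

-- B's predicate is exactly "some pawn in the row attacks column c"
lemma pvAttacked_eq (b : List String) (c : Nat) :
    (List.range b.length).any (fun x => pvAtt b x c) = pvAttacked b c := by
  rw [Bool.eq_iff_iff]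
  simp only [List.any_eq_true, List.mem_range, pvAttacked, Bool.or_eq_true, Bool.and_eq_true,
    decide_eq_true_eq]
  constructor
  · rintro ⟨x, hx, hatt⟩
    have h' := (pvAtt_iff b x c).mp hatt
    rcases h'.2 with ⟨hx0, rfl⟩ | ⟨hxl, rfl⟩
    · left
      refine ⟨by omega, ?_⟩
      rw [show x - 1 + 1 = x from by omega]
      exact h'.1
    · right
      refine ⟨⟨by omega, by omega⟩, ?_⟩
      rw [show x + 1 - 1 = x from by omega]
      exact h'.1
  · rintro (⟨hlt, hp⟩ | ⟨⟨hc1, hlt⟩, hp⟩)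
    · exact ⟨c + 1, hlt, (pvAtt_iff b (c + 1) c).mpr ⟨hp, Or.inl ⟨by omega, by omega⟩⟩⟩
    · exact ⟨c - 1, by omega, (pvAtt_iff b (c - 1) c).mpr ⟨hp, Or.inr ⟨hlt, by omega⟩⟩⟩

-- rebuilding a row cell by cell with no mark is the identity
lemma pvRowId (u : List String) : (List.range u.length).map (fun c => u.getD c "") = u := by
  apply List.ext_getElem
  · simp
  · intro i h1 h2
    simp [List.getD_eq_getElem?_getD, List.getElem?_eq_getElem h2]

lemma pvAlt_length (grid : List (List String)) :
    (comprometerTabuleiro_alt grid).length = grid.length := by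
  simp [comprometerTabuleiro_alt]

lemma pvAlt_getD (grid : List (List String)) (r : Nat) (h : r < grid.length) :
    (comprometerTabuleiro_alt grid).getD r [] =
      (List.range (grid.getD r []).length).map (fun c =>
        if r + 1 < grid.length && pvAttacked (grid.getD (r + 1) []) c then "X"
        else (grid.getD r []).getD c "") := by
  unfold comprometerTabuleiro_alt
  rw [List.getD_eq_getElem?_getD, List.getElem?_map, List.getElem?_range h]
  rfl

-- the last row of B's output is the last row of the input
lemma pvAlt_last (grid : List (List String)) (h0 : 0 < grid.length) :
    (comprometerTabuleiro_alt grid).getD (grid.length - 1) [] = grid.getD (grid.length - 1) [] := by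
  rw [pvAlt_getD grid _ (by omega)]
  have hf : ¬ (grid.length - 1 + 1 < grid.length) := by omega
  calc (List.range (grid.getD (grid.length - 1) []).length).map (fun c =>
        if grid.length - 1 + 1 < grid.length && pvAttacked (grid.getD (grid.length - 1 + 1) []) c then "X"
        else (grid.getD (grid.length - 1) []).getD c "")
      = (List.range (grid.getD (grid.length - 1) []).length).map
          (fun c => (grid.getD (grid.length - 1) []).getD c "") := by
        apply List.map_congr_left; intro c _; simp [hf]
    _ = _ := pvRowId _

-- under Pre_, A's per-row loop produces exactly B's row r (for r + 1 < n)
lemma pvRowA_eq_altRow (grid : List (List String)) (hpre : Pre_comprometerTabuleiro grid)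
    (r : Nat) (hr : r + 1 < grid.length) :
    pvRowA (grid.getD (r + 1) []) (grid.getD r []) (List.range (grid.getD (r + 1) []).length)
      = (comprometerTabuleiro_alt grid).getD r [] := by
  have hbound : ∀ x ∈ List.range (grid.getD (r + 1) []).length, ∀ c,
      pvAtt (grid.getD (r + 1) []) x c = true → c < (grid.getD r []).length := by
    intro x _ c hatt
    have hxlt := pvAtt_lt _ _ _ hatt
    have h' := (pvAtt_iff _ _ _).mp hatt
    have hpre' := hpre r (by omega) x hxlt h'.1
    rcases h'.2 with ⟨hx0, rfl⟩ | ⟨hxl, rfl⟩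
    · exact hpre'.1 hx0
    · exact hpre'.2 (by omega)
  rw [pvAlt_getD grid r (by omega)]
  apply List.ext_getElem
  · rw [pvRowA_length]; simp
  · intro i h1 h2
    have hiu : i < (grid.getD r []).length := by rwa [pvRowA_length] at h1
    rw [← List.getD_eq_getElem _ "" h1]
    rw [pvRowA_getD _ _ _ hbound i, pvAttacked_eq]
    simp only [List.getElem_map, List.getElem_range]
    simp [hr]

-- A's inner loop factored through the row above (used by pvStep_mixed; proved below pvBodyA)
lemma pvInnerA_factor (l : List Nat) (g : List (List String)) (y : Nat)
    (h1 : 1 ≤ y) (h2 : y < g.length) :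
    l.foldl (fun g x =>
      if (g.getD y []).getD x "" = "P" then
        let g1 := if 0 < x then pvSetCell g (y - 1) (x - 1) "X" else g
        if x < (g1.getD y []).length - 1 then pvSetCell g1 (y - 1) (x + 1) "X" else g1
      else g) g
    = g.set (y - 1) (pvRowA (g.getD y []) (g.getD (y - 1) []) l) := by
  induction l generalizing g with
  | nil =>
    show g = g.set (y - 1) (g.getD (y - 1) [])
    rw [pv_set_getD_self _ _ _ (Nat.lt_of_le_of_lt (Nat.sub_le _ _) h2)]
  | cons x l ih =>
    have hne' : y - 1 ≠ y := by omega
    have hy1 : y - 1 < g.length := Nat.lt_of_le_of_lt (Nat.sub_le _ _) h2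
    have hkey : (if (g.getD y []).getD x "" = "P" then
        let g1 := if 0 < x then pvSetCell g (y - 1) (x - 1) "X" else g
        if x < (g1.getD y []).length - 1 then pvSetCell g1 (y - 1) (x + 1) "X" else g1
      else g)
      = g.set (y - 1) (if (g.getD y []).getD x "" = "P" then
          let u1 := if 0 < x then (g.getD (y - 1) []).set (x - 1) "X" else (g.getD (y - 1) [])
          if x < (g.getD y []).length - 1 then u1.set (x + 1) "X" else u1
        else (g.getD (y - 1) [])) := by
      split
      case isTrue hp =>
        dsimp only
        have hg1 : (if 0 < x then pvSetCell g (y - 1) (x - 1) "X" else g)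
            = g.set (y - 1) (if 0 < x then (g.getD (y - 1) []).set (x - 1) "X" else (g.getD (y - 1) [])) := by
          split
          · rfl
          · rw [pv_set_getD_self _ _ _ hy1]
        rw [hg1]
        rw [pv_getD_set_ne _ _ _ _ _ hne']
        split
        · unfold pvSetCell
          rw [pv_getD_set_self _ _ _ _ hy1, List.set_set]
        · rfl
      case isFalse hp =>
        rw [pv_set_getD_self _ _ _ hy1]
    show List.foldl _ _ (x :: l) = _
    rw [List.foldl_cons, hkey, ih _ (by simpa using h2)]
    rw [pv_getD_set_ne _ _ _ _ _ hne', pv_getD_set_self _ _ _ _ hy1, List.set_set]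
    rfl


lemma pvBodyA_factor (g : List (List String)) (y : Nat) (h1 : 1 ≤ y) (h2 : y < g.length) :
    pvBodyA g y = g.set (y - 1) (pvRowA (g.getD y []) (g.getD (y - 1) []) (List.range (g.getD y []).length)) :=
  pvInnerA_factor _ g y h1 h2

-- one outer iteration turns the mixed state (B's rows < s, input rows ≥ s) into mixed (s+1)
lemma pvStep_mixed (grid : List (List String)) (hpre : Pre_comprometerTabuleiro grid)
    (s : Nat) (hs : s + 1 < grid.length) :
    pvBodyA ((comprometerTabuleiro_alt grid).take s ++ grid.drop s) (s + 1)
      = (comprometerTabuleiro_alt grid).take (s + 1) ++ grid.drop (s + 1) := by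
  set B := comprometerTabuleiro_alt grid with hB
  have hBlen : B.length = grid.length := pvAlt_length grid
  have hslen : (B.take s).length = s := by rw [List.length_take]; omega
  have hmixlen : (B.take s ++ grid.drop s).length = grid.length := by
    rw [List.length_append, hslen, List.length_drop]; omega
  have hmget : ∀ i, s ≤ i → (B.take s ++ grid.drop s).getD i [] = grid.getD i [] := by
    intro i hi
    rw [List.getD_eq_getElem?_getD, List.getElem?_append_right (hslen.trans_le hi), hslen,
      List.getElem?_drop, List.getD_eq_getElem?_getD,
      show s + (i - s) = i from by omega]
  -- run A's inner loop, lifted to the row above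
  rw [pvBodyA_factor _ _ (by omega) (by rw [hmixlen]; omega)]
  simp only [Nat.add_sub_cancel]
  rw [hmget (s + 1) (by omega), hmget s (by omega)]
  rw [pvRowA_eq_altRow grid hpre s hs, ← hB]
  -- list surgery: setting index s of the mixed list to B's row s advances the frontier
  have hdrop : grid.drop s = grid.getD s [] :: grid.drop (s + 1) := by
    rw [List.getD_eq_getElem _ [] (by omega)]
    exact List.drop_eq_getElem_cons (by omega)
  have htake : B.take (s + 1) = B.take s ++ [B.getD s []] := by
    rw [List.getD_eq_getElem _ [] (by omega)]
    exact List.take_succ_eq_append_getElem (by omega)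
  rw [hdrop, htake]
  rw [show (B.take s ++ grid.getD s [] :: grid.drop (s + 1)).set s (B.getD s [])
        = B.take s ++ (grid.getD s [] :: grid.drop (s + 1)).set 0 (B.getD s []) from by
      rw [List.set_append]; simp [hslen]]
  simp

-- the whole outer loop, by induction on the remaining iteration count
lemma pvOuter (grid : List (List String)) (hpre : Pre_comprometerTabuleiro grid) :
    ∀ (cnt s : Nat), s + cnt = grid.length - 1 →
      (List.range' (s + 1) cnt).foldl pvBodyA
          ((comprometerTabuleiro_alt grid).take s ++ grid.drop s)
        = (comprometerTabuleiro_alt grid).take (grid.length - 1) ++ grid.drop (grid.length - 1) := by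
  intro cnt
  induction cnt with
  | zero =>
    intro s hs
    simp only [List.range'_zero, List.foldl_nil]
    rw [show s = grid.length - 1 from by omega]
  | succ cnt ih =>
    intro s hs
    rw [List.range'_succ, List.foldl_cons, pvStep_mixed grid hpre s (by omega)]
    exact ih (s + 1) (by omega)

-- the mixed state at the end is exactly B's output
lemma pvMixed_final (grid : List (List String)) :
    (comprometerTabuleiro_alt grid).take (grid.length - 1) ++ grid.drop (grid.length - 1)
      = comprometerTabuleiro_alt grid := by
  rcases Nat.eq_zero_or_pos grid.length with h0 | h0
  · have : grid = [] := List.eq_nil_of_length_eq_zero h0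
    subst this; rfl
  · set B := comprometerTabuleiro_alt grid with hB
    have hBlen : B.length = grid.length := pvAlt_length grid
    have hdrop : grid.drop (grid.length - 1) = [grid.getD (grid.length - 1) []] := by
      rw [List.drop_eq_getElem_cons (show grid.length - 1 < grid.length by omega)]
      rw [show grid.length - 1 + 1 = grid.length from by omega, List.drop_length]
      rw [List.getD_eq_getElem _ [] (by omega)]
    have htake : B = B.take (grid.length - 1) ++ [B.getD (grid.length - 1) []] := by
      rw [List.getD_eq_getElem _ [] (by omega)]
      rw [← List.take_succ_eq_append_getElem (by omega)]
      rw [show grid.length - 1 + 1 = grid.length from by omega, ← hBlen, List.take_length]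
    rw [hdrop, ← pvAlt_last grid h0, ← hB]
    exact htake.symm

-- ===== VERDICT (by name: the statement is the Claim_ definition above) =====
theorem comprometerTabuleiro_spec : Claim_equal_comprometerTabuleiro := by
  intro grid _ hpre
  unfold Spec_comprometerTabuleiro comprometerTabuleiro
  have h := pvOuter grid hpre (grid.length - 1) 0 (by omega)
  simp only [List.take_zero, List.drop_zero, List.nil_append] at h
  rw [h, pvMixed_final]
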